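-- pv_equiv track=rewrite | github.com/aeromechanic000/minecraft-ai-python | world.py | recipt_sort_by_common_items
-- ===== SOURCE A (Python) =====
-- def recipt_sort_by_common_items(a, b) :
--     common_items = ['oak_planks', 'oak_log', 'coal', 'cobblestone']
--     common_count_a = 0
--     common_count_b = 0
--     for key, value in a[0].items() :
--         if key in common_items :
--             common_count_a += value
--     for key, value in b[0].items() :
--         if key in common_items :
--             common_count_b += value
--     return common_count_b - common_count_a
-- ===== SOURCE B (Python) =====
-- def recipt_sort_by_common_items(a, b):
--     common_items = ['oak_planks', 'oak_log', 'coal', 'cobblestone']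
--     def score(recipe):
--         return sum(recipe.get(item, 0) for item in common_items)
--     return score(b[0]) - score(a[0])
-- ===== Notes on version B (the rewrite author's own statement) =====
-- stated objective: idiomatic
-- what changed: Instead of scanning every entry of each recipe dict and testing membership in the common-items list, B loops over the fixed 4-element common_items list and looks each item up in the recipe dict with .get(item, 0), summing per recipe via a shared helper; per-recipe cost drops from O(|dict|*4) to O(4).
import Mathlib
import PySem

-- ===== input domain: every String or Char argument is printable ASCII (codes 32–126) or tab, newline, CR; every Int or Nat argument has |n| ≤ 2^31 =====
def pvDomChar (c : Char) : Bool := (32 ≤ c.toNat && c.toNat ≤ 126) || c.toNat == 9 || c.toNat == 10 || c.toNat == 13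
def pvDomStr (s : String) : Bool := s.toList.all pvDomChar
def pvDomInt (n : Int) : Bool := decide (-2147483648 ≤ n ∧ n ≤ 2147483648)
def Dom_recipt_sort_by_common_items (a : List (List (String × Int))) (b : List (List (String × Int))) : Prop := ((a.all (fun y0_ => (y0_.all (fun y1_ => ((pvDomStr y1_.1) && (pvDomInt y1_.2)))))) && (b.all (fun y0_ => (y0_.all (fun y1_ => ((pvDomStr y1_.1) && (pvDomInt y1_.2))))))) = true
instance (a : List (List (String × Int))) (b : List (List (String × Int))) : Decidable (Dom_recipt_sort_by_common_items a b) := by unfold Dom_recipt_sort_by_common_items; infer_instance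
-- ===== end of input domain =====

-- B replaces the scan of each recipe dict (membership test per entry) by four direct
-- .get lookups, one per common item, summed by a shared helper (idiomatic; same speed class).

-- ===== PORT A =====
def pvCommonItems : List String := ["oak_planks", "oak_log", "coal", "cobblestone"]

def recipt_sort_by_common_items (a : List (List (String × Int))) (b : List (List (String × Int))) : Int :=
  -- a[0] / b[0]: IndexError on empty list, excluded by Pre_
  let ra := (PySem.List.pyGet? a 0).getD []
  let rb := (PySem.List.pyGet? b 0).getD []
  let common_count_a := ra.foldl (fun acc kv => if pvCommonItems.contains kv.1 then acc + kv.2 else acc) 0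
  let common_count_b := rb.foldl (fun acc kv => if pvCommonItems.contains kv.1 then acc + kv.2 else acc) 0
  common_count_b - common_count_a

-- ===== PORT B =====
-- recipe.get(item, 0): first matching key in the association list
def pvScore (r : List (String × Int)) : Int :=
  (pvCommonItems.map (fun c => ((r.find? (fun kv => kv.1 == c)).map Prod.snd).getD 0)).sum

def recipt_sort_by_common_items_alt (a : List (List (String × Int))) (b : List (List (String × Int))) : Int :=
  pvScore ((PySem.List.pyGet? b 0).getD []) - pvScore ((PySem.List.pyGet? a 0).getD [])

-- ===== PRECONDITION & SPEC =====
-- Pre_ excludes empty a or b (a[0]/b[0] raise IndexError in Python), and association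
-- lists whose first recipe has duplicate keys: a Python dict cannot contain duplicate
-- keys, so such lists do not represent any dict input and their reading is accidental.
def Pre_recipt_sort_by_common_items (a : List (List (String × Int))) (b : List (List (String × Int))) : Prop :=
  a ≠ [] ∧ b ≠ [] ∧ ((a.headD []).map Prod.fst).Nodup ∧ ((b.headD []).map Prod.fst).Nodup
instance (a : List (List (String × Int))) (b : List (List (String × Int))) : Decidable (Pre_recipt_sort_by_common_items a b) := by unfold Pre_recipt_sort_by_common_items; infer_instance

def pvWitness_recipt_sort_by_common_items : (List (List (String × Int))) × (List (List (String × Int))) :=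
  ([[("coal", 3), ("dirt", 5)]], [[("cobblestone", 7)]])

def Spec_recipt_sort_by_common_items (a : List (List (String × Int))) (b : List (List (String × Int))) (out : Int) : Prop := out = recipt_sort_by_common_items_alt a b
instance (a : List (List (String × Int))) (b : List (List (String × Int))) (out : Int) : Decidable (Spec_recipt_sort_by_common_items a b out) := by unfold Spec_recipt_sort_by_common_items; infer_instance

-- ===== CLAIM (what is proved, stated in full; the proofs are below) =====
def Claim_equal_recipt_sort_by_common_items : Prop := ∀ (a : List (List (String × Int))) (b : List (List (String × Int))), Dom_recipt_sort_by_common_items a b → Pre_recipt_sort_by_common_items a b → Spec_recipt_sort_by_common_items a b (recipt_sort_by_common_items a b)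

-- ===== LEMMAS AND PROOFS =====

-- A's loop with an arbitrary accumulator splits off the accumulator.
theorem pv_foldl_init (t : List (String × Int)) (c : Int) :
    t.foldl (fun acc kv => if pvCommonItems.contains kv.1 then acc + kv.2 else acc) c
      = c + t.foldl (fun acc kv => if pvCommonItems.contains kv.1 then acc + kv.2 else acc) 0 := by
  induction t generalizing c with
  | nil => simp
  | cons kv t ih =>
    simp only [List.foldl_cons]
    rw [ih, ih (if pvCommonItems.contains kv.1 then 0 + kv.2 else 0)]
    split <;> omega

theorem pv_find_none (t : List (String × Int)) (k : String) (h : k ∉ t.map Prod.fst) :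
    t.find? (fun kv => kv.1 == k) = none := by
  rw [List.find?_eq_none]
  intro kv hkv hbeq
  exact h (List.mem_map.mpr ⟨kv, hkv, (eq_of_beq hbeq)⟩)

-- Summing lookups over a duplicate-free list of item names, prepending a fresh key.
theorem pv_score_cons_gen (cs : List String) (hcs : cs.Nodup) (k : String) (v : Int)
    (t : List (String × Int)) (ht : k ∉ t.map Prod.fst) :
    (cs.map (fun c => ((((k, v) :: t).find? (fun kv => kv.1 == c)).map Prod.snd).getD 0)).sum
      = (if cs.contains k then v else 0)
        + (cs.map (fun c => ((t.find? (fun kv => kv.1 == c)).map Prod.snd).getD 0)).sum := by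
  induction cs with
  | nil => simp
  | cons c cs ih =>
    have hnd := (List.nodup_cons.mp hcs)
    simp only [List.map_cons, List.sum_cons, List.contains_cons]
    rw [ih hnd.2]
    by_cases hk : k = c
    · subst hk
      have h2 : cs.contains k = false := by
        simp_all [List.contains_eq_mem]
      rw [List.find?_cons_of_pos (by simp), pv_find_none t k ht]
      simp [hnd.1]
    · rw [List.find?_cons_of_neg (by simp [hk])]
      have h2 : (k == c) = false := by simp [hk]
      simp only [h2, Bool.false_or]
      split <;> ring
-- A's filtered scan of a duplicate-free recipe equals B's four lookups.
theorem pv_count_eq_score (r : List (String × Int)) (h : (r.map Prod.fst).Nodup) :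
    r.foldl (fun acc kv => if pvCommonItems.contains kv.1 then acc + kv.2 else acc) 0
      = pvScore r := by
  induction r with
  | nil => simp [pvScore, pvCommonItems]
  | cons kv t ih =>
    obtain ⟨k, v⟩ := kv
    simp only [List.map_cons, List.nodup_cons] at h
    simp only [List.foldl_cons]
    rw [pv_foldl_init, ih h.2]
    unfold pvScore
    rw [pv_score_cons_gen pvCommonItems (by decide) k v t h.1]
    split <;> simp

-- ===== VERDICT (by name: the statement is the Claim_ definition above) =====
theorem recipt_sort_by_common_items_spec : Claim_equal_recipt_sort_by_common_items := by
  intro a b _ hpre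
  obtain ⟨ha, hb, hna, hnb⟩ := hpre
  unfold Spec_recipt_sort_by_common_items recipt_sort_by_common_items recipt_sort_by_common_items_alt
  cases a with
  | nil => exact absurd rfl ha
  | cons ra as =>
    cases b with
    | nil => exact absurd rfl hb
    | cons rb bs =>
      simp only [List.headD_cons] at hna hnb
      have hga : PySem.List.pyGet? (ra :: as) 0 = some ra := by
        simp [PySem.List.pyGet?, PySem.List.pyIdx?]
      have hgb : PySem.List.pyGet? (rb :: bs) 0 = some rb := by
        simp [PySem.List.pyGet?, PySem.List.pyIdx?]
      rw [hga, hgb]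
      simp only [Option.getD_some]
      rw [pv_count_eq_score ra hna, pv_count_eq_score rb hnb]
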